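/- GENERATED by farm/mkstatement.py from design/units.tsv (unit `digest_file.6`) and the assertions of Gif/Spec/Seg_digest_file.lean — do not edit.
   THE STATEMENT of the proof unit `digest_file.6`: segment 6 of `digest_file` (25 instructions; entries 0x10594b;
   exits 0x1059af; ranges 0x10594b-0x1059af)
   takes each of its entry assertions to one of its exit assertions (`Gif.Spec.digest_file.Seg6`), given the contracts of its callees.
   What the names mean: ProgX/Base/Spec/Basic.lean (the shared hypotheses), Gif/Spec/Seg_digest_file.lean (the assertions). The theorem to prove:
   `theorem digest_file_6_ok : Gif.Spec.digest_file_6.Statement`. -/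
import Gif.Code
import Gif.Dec.All
import Gif.Labels
import Gif.Spec.Driver
import Gif.Spec.Seg_digest_file
namespace Gif.Spec.digest_file_6
open X86 X86.User Asan

/-- The statement of unit `digest_file.6`. -/
def Statement : Prop :=
  ∀ (Lay : Layout) (_hLay : Lay.hi = 0x1000000) (μ : Microarch) (_hμ : UserX.MicroOK μ) (u₀ : State)
    (_hcode : HasCodeNat Lay u₀ Gif.L.digest_file.entry Gif.Code.code_digest_file.nat Gif.L.digest_file.size)
    (_h_digest_map : ∀ (H : Heap) (rest : List Obj) (frames : List (Nat × FrameLayout)) (m : Option Map), Calls Lay μ ProgX.Base.WayInv (ProgX.Base.conv u₀) Gif.L.digest_map.entry (Gif.Spec.digest_map.spec H rest frames m))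
    (_h_digest_bytes : ∀ (H : Heap) (rest : List Obj) (frames : List (Nat × FrameLayout)), Calls Lay μ ProgX.Base.WayInv (ProgX.Base.conv u₀) Gif.L.digest_bytes.entry (Gif.Spec.digest_bytes.spec H rest frames))
    (_h_digest_extensions : ∀ (H : Heap) (rest : List Obj) (frames : List (Nat × FrameLayout)) (e : Option Exts), Calls Lay μ ProgX.Base.WayInv (ProgX.Base.conv u₀) Gif.L.digest_extensions.entry (Gif.Spec.digest_extensions.spec H rest frames e))
    (_h_asan_load8_noabort : Asan.SmallCheck Lay μ ProgX.Base.WayInv (ProgX.Base.CodeOK u₀) [.rax, .rcx, .rdx] 8 ProgX.Base.L.__asan_load8_noabort.entry)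
    (_h_asan_load4_noabort : Asan.SmallCheck Lay μ ProgX.Base.WayInv (ProgX.Base.CodeOK u₀) [.rax, .rcx, .rdx] 4 ProgX.Base.L.__asan_load4_noabort.entry),
    Gif.Spec.digest_file.Seg6 Lay μ u₀

end Gif.Spec.digest_file_6
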